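-- pv_equiv track=rewrite | github.com/MIWAMIWAMIWA/Algo | src/beer_problem.py | string_to_matrix
-- ===== SOURCE A (Python) =====
-- def string_to_matrix(string):
--     """
--     :returns matrix where row is user and indexes of preferences of beer:
--     """
--     final_matrix = []
--     row_arr = []
--     must_have_beers = set()
--     for i in string:
--         if i != " ":
--             if i == "Y":
--                 row_arr.append(1)
--             else:
--                 row_arr.append(0)
--         else:
--             final_matrix.append(row_arr)
--             if sum(row_arr) == 1:
--                 must_have_beers.add(row_arr.index(1))
--             row_arr = []
--     final_matrix.append(row_arr)
--     if sum(row_arr) == 1: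
--         must_have_beers.add(row_arr.index(1))
--
--     return final_matrix, must_have_beers
-- ===== SOURCE B (Python) =====
-- def string_to_matrix(string):
--     """
--     :returns matrix where row is user and indexes of preferences of beer:
--     """
--     bounds = [-1] + [i for i, c in enumerate(string) if c == " "] + [len(string)]
--     final_matrix = [[1 if c == "Y" else 0 for c in string[lo + 1 : hi]]
--                     for lo, hi in zip(bounds, bounds[1:])]
--     must_have_beers = {row.index(1) for row in final_matrix if sum(row) == 1}
--     return final_matrix, must_have_beers
-- ===== Notes on version B (the rewrite author's own statement) =====
-- stated objective: alternative
-- what changed: Replaces A's stateful character loop (running row accumulator flushed at each space, with duplicated end-of-loop flush code and in-loop set updates) by first building an index of the space positions via enumerate, cutting each row out of the string by slicing between consecutive boundaries, and computing the must-have beers in a separate set-comprehension pass over the finished matrix.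
import Mathlib
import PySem

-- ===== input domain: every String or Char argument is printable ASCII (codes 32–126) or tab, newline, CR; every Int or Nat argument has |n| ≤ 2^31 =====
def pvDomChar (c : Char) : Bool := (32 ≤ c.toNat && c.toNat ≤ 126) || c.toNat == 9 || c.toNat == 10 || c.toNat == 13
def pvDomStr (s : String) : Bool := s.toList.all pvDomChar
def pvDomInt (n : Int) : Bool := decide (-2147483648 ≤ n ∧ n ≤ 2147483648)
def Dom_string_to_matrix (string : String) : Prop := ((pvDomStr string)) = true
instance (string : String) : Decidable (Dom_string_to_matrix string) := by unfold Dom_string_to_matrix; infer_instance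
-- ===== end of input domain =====

-- B replaces A's stateful boundary-tracking character loop with an index of the
-- space positions, rows cut out of the string by slicing between consecutive
-- boundaries, and a separate set-comprehension pass for the must-have beers
-- (objective: alternative).

-- ===== PORT A =====
-- 'if sum(row_arr) == 1: must_have_beers.add(row_arr.index(1))' — index(1) cannot raise
-- here (a 0/1 row with sum 1 contains a 1), so the 'none' branch leaves the set unchanged.
def stmAflush (s : PySem.Set Int) (row : List Int) : PySem.Set Int :=
  if row.sum == 1 then
    match PySem.List.index? row 1 with
    | some k => PySem.Set.add s (k : Int)
    | none => s
  else s

def stmAstep (st : List (List Int) × List Int × PySem.Set Int) (i : Char) :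
    List (List Int) × List Int × PySem.Set Int :=
  if i ≠ ' ' then
    (st.1, st.2.1 ++ [if i = 'Y' then (1 : Int) else 0], st.2.2)
  else
    (st.1 ++ [st.2.1], [], stmAflush st.2.2 st.2.1)

def string_to_matrix (string : String) : List (List Int) × List Int :=
  let st := string.toList.foldl stmAstep ([], [], PySem.Set.empty)
  (st.1 ++ [st.2.1], stmAflush st.2.2 st.2.1)

-- ===== PORT B =====
-- '{row.index(1) for row in final_matrix if sum(row) == 1}' — as in A, row.index(1)
-- cannot raise on a 0/1 row whose sum is 1, so the 'none' branch leaves the set unchanged.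
def string_to_matrix_alt (string : String) : List (List Int) × List Int :=
  let cs := string.toList
  let bounds : List Int :=
    [-1] ++ ((PySem.List.enumerate cs 0).filter (fun p => p.2 == ' ')).map (fun p => p.1)
         ++ [(cs.length : Int)]
  let final_matrix :=
    (bounds.zip (PySem.List.slice bounds (some 1) none)).map
      (fun p => (PySem.List.slice cs (some (p.1 + 1)) (some p.2)).map
        (fun c => if c = 'Y' then (1 : Int) else 0))
  let must := final_matrix.foldl (fun s row =>
      if row.sum == 1 then
        match PySem.List.index? row 1 with
        | some k => PySem.Set.add s (k : Int)
        | none => s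
      else s) PySem.Set.empty
  (final_matrix, must)

-- ===== PRECONDITION & SPEC =====
def Spec_string_to_matrix (string : String) (out : List (List Int) × List Int) : Prop := out = string_to_matrix_alt string
instance (string : String) (out : List (List Int) × List Int) : Decidable (Spec_string_to_matrix string out) := by unfold Spec_string_to_matrix; infer_instance

-- ===== CLAIM (what is proved, stated in full; the proofs are below) =====
def Claim_equal_string_to_matrix : Prop := ∀ (string : String), Dom_string_to_matrix string → Spec_string_to_matrix string (string_to_matrix string)

-- ===== LEMMAS AND PROOFS =====

/-- Prepend a prefix onto the first piece of a split (total form). -/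
def stmConsHead (p : List Int) : List (List Int) → List (List Int)
  | [] => [p]
  | t :: ts => (p ++ t) :: ts

/-- Structural single-char split of the string into Y/N rows: the common
characterisation both ports are proved equal to. -/
def stmRows : List Char → List (List Int)
  | [] => [[]]
  | c :: rest =>
    if c = ' ' then [] :: stmRows rest
    else stmConsHead [if c = 'Y' then (1 : Int) else 0] (stmRows rest)

/-- The per-row must-have update shared by both characterisations. -/
def stmBupd (s : PySem.Set Int) (row : List Int) : PySem.Set Int :=
  if row.sum == 1 then
    match PySem.List.index? row 1 with
    | some k => PySem.Set.add s (k : Int)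
    | none => s
  else s

theorem stmRows_ne_nil (cs : List Char) : stmRows cs ≠ [] := by
  cases cs with
  | nil => simp [stmRows]
  | cons c rest =>
    simp only [stmRows]
    split
    · simp
    · cases h : stmRows rest <;> simp [stmConsHead]

theorem stmConsHead_nil_of_ne (l : List (List Int)) (h : l ≠ []) : stmConsHead [] l = l := by
  cases l with
  | nil => exact absurd rfl h
  | cons t ts => simp [stmConsHead]

theorem stmConsHead_consHead (a b : List Int) (l : List (List Int)) :
    stmConsHead a (stmConsHead b l) = stmConsHead (a ++ b) l := by
  cases l <;> simp [stmConsHead]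

/-- A's fold, flushed at the end, equals the structural rows and a row-wise set pass. -/
theorem stmMain (cs : List Char) : ∀ (fm0 : List (List Int)) (row0 : List Int) (s0 : PySem.Set Int),
    (let st := cs.foldl stmAstep (fm0, row0, s0)
     (st.1 ++ [st.2.1], stmAflush st.2.2 st.2.1)) =
      (fm0 ++ stmConsHead row0 (stmRows cs),
       (stmConsHead row0 (stmRows cs)).foldl stmBupd s0) := by
  induction cs with
  | nil =>
    intro fm0 row0 s0
    simp [stmRows, stmConsHead, stmAflush, stmBupd]
  | cons c rest ih =>
    intro fm0 row0 s0
    by_cases hc : c = ' '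
    · subst hc
      simp only [List.foldl_cons, stmAstep, ne_eq, not_true_eq_false, if_false]
      rw [ih]
      simp only [stmRows]
      rw [stmConsHead_nil_of_ne _ (stmRows_ne_nil rest)]
      have : stmAflush s0 row0 = stmBupd s0 row0 := rfl
      simp [stmConsHead, this]
    · simp only [List.foldl_cons, stmAstep, ne_eq, hc, not_false_eq_true, if_pos]
      rw [ih]
      simp only [stmRows, if_neg hc]
      rw [stmConsHead_consHead]

-- ---- B side: the boundary/zip/slice construction equals stmRows ----

def stmBit (c : Char) : Int := if c = 'Y' then 1 else 0

def stmRowOf (full : List Char) (p : Int × Int) : List Int :=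
  (PySem.List.slice full (some (p.1 + 1)) (some p.2)).map stmBit

def stmPos (cs : List Char) (s : Int) : List Int :=
  ((PySem.List.enumerate cs s).filter (fun p => p.2 == ' ')).map (fun p => p.1)

theorem stmPos_cons (c : Char) (cs : List Char) (s : Int) :
    stmPos (c :: cs) s = (if c = ' ' then [s] else []) ++ stmPos cs (s + 1) := by
  by_cases hc : c = ' ' <;>
    simp [stmPos, PySem.List.enumerate_cons, hc]

theorem stmPos_shift (cs : List Char) : ∀ s : Int, stmPos cs (s + 1) = (stmPos cs s).map (· + 1) := by
  induction cs with
  | nil => intro s; simp [stmPos, PySem.List.enumerate_nil]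
  | cons c rest ih =>
    intro s
    rw [stmPos_cons, stmPos_cons, ih]
    by_cases hc : c = ' ' <;> simp [hc]

theorem stmPos_ge (cs : List Char) : ∀ (s b : Int), b ∈ stmPos cs s → s ≤ b := by
  induction cs with
  | nil => intro s b h; simp [stmPos, PySem.List.enumerate_nil] at h
  | cons c rest ih =>
    intro s b h
    rw [stmPos_cons] at h
    rcases List.mem_append.mp h with h' | h'
    · split at h' <;> simp_all
    · have := ih (s + 1) b h'; omega

/-- Slicing between shifted bounds on `c :: xs` is slicing between the bounds on `xs`. -/
theorem stmSliceShift {α : Type} (c : α) (xs : List α) (a b : Int) (ha : 0 ≤ a) (hb : 0 ≤ b) :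
    PySem.List.slice (c :: xs) (some (a + 1)) (some (b + 1)) = PySem.List.slice xs (some a) (some b) := by
  rw [PySem.List.slice_toNat (c :: xs) (by omega) (by omega), PySem.List.slice_toNat xs ha hb]
  have h1 : (a + 1).toNat = a.toNat + 1 := by omega
  have h2 : (b + 1).toNat = b.toNat + 1 := by omega
  simp [h1, h2]

/-- Shift a whole boundary list by one while consing a character on the front. -/
theorem stmZipShift (full : List Char) (c : Char) (l : List Int)
    (h : ∀ p ∈ l.zip (l.drop 1), -1 ≤ p.1 ∧ 0 ≤ p.2) :
    ((l.map (· + 1)).zip ((l.map (· + 1)).drop 1)).map (stmRowOf (c :: full)) =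
      (l.zip (l.drop 1)).map (stmRowOf full) := by
  rw [← List.map_drop, List.zip_map, List.map_map]
  refine List.map_congr_left ?_
  intro p hp
  obtain ⟨h1, h2⟩ := h p hp
  cases p with
  | mk lo hi =>
    simp only [Function.comp, Prod.map, stmRowOf]
    have : lo + 1 + 1 = (lo + 1) + 1 := rfl
    rw [stmSliceShift c full (lo + 1) hi (by omega) h2]

theorem stmBoundsPairs_ge (t : List Int)
    (ht : ∀ b ∈ t, 0 ≤ b) :
    ∀ p ∈ (((-1 : Int) :: t).zip (((-1 : Int) :: t).drop 1)), -1 ≤ p.1 ∧ 0 ≤ p.2 := by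
  intro p hp
  simp only [List.drop_one, List.tail_cons] at hp
  obtain ⟨hp1, hp2⟩ := List.of_mem_zip hp
  constructor
  · rcases List.mem_cons.mp hp1 with h | h
    · omega
    · exact le_trans (by omega) (ht _ h)
  · exact ht _ hp2

/-- B's zipped boundary slices are exactly the structural rows. -/
theorem stmRowsB_eq (cs : List Char) :
    ((((-1 : Int) :: (stmPos cs 0 ++ [(cs.length : Int)])).zip
        (stmPos cs 0 ++ [(cs.length : Int)])).map (stmRowOf cs)) = stmRows cs := by
  induction cs with
  | nil =>
    simp only [stmPos, PySem.List.enumerate_nil, List.filter_nil, List.map_nil, List.nil_append,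
      List.length_nil, Nat.cast_zero, stmRows]
    decide
  | cons c rest ih =>
    have hts : ∀ b ∈ stmPos rest 0 ++ [(rest.length : Int)], 0 ≤ b := by
      intro b hb
      rcases List.mem_append.mp hb with h | h
      · exact stmPos_ge rest 0 b h
      · simp at h; omega
    have hlen : (((c :: rest).length : Int)) = (rest.length : Int) + 1 := by
      simp [List.length_cons]
    have hshift2 : stmPos (c :: rest) 0 =
        (if c = ' ' then [(0 : Int)] else []) ++ (stmPos rest 0).map (· + 1) := by
      rw [stmPos_cons]
      congr 1
      exact stmPos_shift rest 0
    by_cases hc : c = ' '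
    · -- a space: a fresh empty first row, all other rows shift by one
      subst hc
      have hzip := stmZipShift rest ' ' ((-1 : Int) :: (stmPos rest 0 ++ [(rest.length : Int)]))
        (stmBoundsPairs_ge _ hts)
      simp only [List.map_cons, List.map_append, List.map_nil, List.drop_one, List.tail_cons,
        neg_add_cancel] at hzip
      have hrow0 : stmRowOf (' ' :: rest) (-1, 0) = [] := by
        simp only [stmRowOf]
        have h1 : (-1 : Int) + 1 = 0 := by ring
        rw [h1, PySem.List.slice_toNat (' ' :: rest) le_rfl le_rfl]
        simp
      rw [hshift2, hlen]
      simp only [if_true, List.singleton_append, List.cons_append, List.nil_append,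
        List.append_assoc, List.zip_cons_cons, List.map_cons]
      rw [show stmRows (' ' :: rest) = [] :: stmRows rest from by simp [stmRows]]
      rw [← ih]
      rw [hrow0, hzip]
    · -- not a space: the character is consed onto the first row
      cases ht : stmPos rest 0 ++ [(rest.length : Int)] with
      | nil => simp at ht
      | cons t0 ts =>
        have ht0 : (0 : Int) ≤ t0 := hts t0 (by rw [ht]; exact List.mem_cons_self ..)
        have hzip := stmZipShift rest c (t0 :: ts) (by
          intro p hp
          obtain ⟨hp1, hp2⟩ := List.of_mem_zip hp
          simp only [List.drop_one, List.tail_cons] at hp2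
          refine ⟨?_, hts p.2 (by rw [ht]; exact List.mem_cons_of_mem _ hp2)⟩
          have : (0 : Int) ≤ p.1 := by
            rcases List.mem_cons.mp hp1 with h | h
            · subst h; exact ht0
            · exact hts p.1 (by rw [ht]; exact List.mem_cons_of_mem _ h)
          omega)
        simp only [List.map_cons, List.drop_one, List.tail_cons] at hzip
        have hA : (stmPos rest 0).map (· + 1) ++ [(rest.length : Int) + 1] =
            (t0 + 1) :: ts.map (· + 1) := by
          have h := congrArg (List.map (· + 1)) ht
          simpa using h
        have hhead : stmRowOf (c :: rest) (-1, t0 + 1) =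
            (if c = 'Y' then (1 : Int) else 0) :: stmRowOf rest (-1, t0) := by
          simp only [stmRowOf]
          have h1 : (-1 : Int) + 1 = 0 := by ring
          rw [h1]
          rw [PySem.List.slice_toNat (c :: rest) (by omega) (by omega),
            PySem.List.slice_toNat rest (by omega) ht0]
          have h2 : (t0 + 1).toNat = t0.toNat + 1 := by omega
          simp [h2, List.take_succ_cons, stmBit]
        rw [hshift2, hlen]
        simp only [if_neg hc, List.nil_append]
        rw [hA]
        simp only [List.zip_cons_cons, List.map_cons]
        rw [show stmRows (c :: rest) = stmConsHead [if c = 'Y' then (1 : Int) else 0]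
              (stmRows rest) from by simp [stmRows, hc]]
        rw [← ih, ht]
        simp only [List.zip_cons_cons, List.map_cons, stmConsHead, List.singleton_append]
        rw [hhead, hzip]

-- ===== VERDICT (by name: the statement is the Claim_ definition above) =====
theorem string_to_matrix_spec : Claim_equal_string_to_matrix := by
  intro s _
  unfold Spec_string_to_matrix
  have halt : string_to_matrix_alt s =
      (((((-1 : Int) :: (stmPos s.toList 0 ++ [(s.toList.length : Int)])).zip
          (stmPos s.toList 0 ++ [(s.toList.length : Int)])).map (stmRowOf s.toList)),
        ((((-1 : Int) :: (stmPos s.toList 0 ++ [(s.toList.length : Int)])).zip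
          (stmPos s.toList 0 ++ [(s.toList.length : Int)])).map (stmRowOf s.toList)).foldl stmBupd
          PySem.Set.empty) := by
    simp only [string_to_matrix_alt, PySem.List.slice_from_one, List.cons_append,
      List.nil_append, List.tail_cons]
    rfl
  rw [halt, stmRowsB_eq]
  have hA := stmMain s.toList [] [] PySem.Set.empty
  rw [stmConsHead_nil_of_ne _ (stmRows_ne_nil s.toList)] at hA
  unfold string_to_matrix
  simpa using hA
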